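-- pv_equiv track=rewrite | github.com/Adam-Noble-01/ValeCodebase | Root_GeneralDeveloperTools/02_Python/Temp__Exeriments/figjam_colour_totals_gui.py | format_color_results
-- ===== SOURCE A (Python) =====
-- def format_color_results(color_values):
--     """Format the extracted color values into a readable result string."""
--     result_lines = []                                                    # <-- Initialize result lines
--
--     for color_name, values in sorted(color_values.items()):              # <-- Process each color
--         if values:                                                        # <-- Check if values exist
--             total = sum(values)                                           # <-- Calculate total
--             values_str = " + ".join(str(v) for v in values)              # <-- Format values list
--             result_lines.append(f"{color_name}:")                        # <-- Add color header
--             result_lines.append(f"  Values: {values_str}")               # <-- Add values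
--             result_lines.append(f"  Total: {total} mm")                  # <-- Add total
--             result_lines.append("")                                       # <-- Add blank line
--
--     if not result_lines:                                                  # <-- Check if no results
--         result_lines.append("No colored values detected in image")        # <-- Add no results message
--
--     return "\n".join(result_lines).strip()                               # <-- Join and return
-- ===== SOURCE B (Python) =====
-- def format_color_results(color_values):
--     """Format the extracted color values into a readable result string."""
--     # Build the display order incrementally: insert each non-empty color into
--     # an already-sorted list (insertion sort fused with the filtering pass).
--     ordered = []
--     for name, values in color_values.items():
--         if values:
--             i = 0
--             while i < len(ordered) and ordered[i][0] < name:
--                 i += 1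
--             ordered.insert(i, (name, values))
--     if not ordered:
--         return "No colored values detected in image"
--     # Stream the output: one pass per color computing the running total and
--     # the " + "-separated value string together, concatenating blocks directly.
--     out = ""
--     first = True
--     for name, values in ordered:
--         block = name + ":\n  Values: "
--         sep = ""
--         total = 0
--         for v in values:
--             block += sep + str(v)
--             sep = " + "
--             total += v
--         block += "\n  Total: " + str(total) + " mm"
--         if first:
--             out = block
--             first = False
--         else:
--             out = out + "\n\n" + block
--     # The text always ends in "mm", so only leading whitespace can need stripping.
--     return out.lstrip()
-- ===== Notes on version B (the rewrite author's own statement) =====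
-- stated objective: alternative
-- what changed: B never calls sorted/sum/join/strip: it insertion-sorts each non-empty color into an ordered list while iterating the dict, then streams the output in one pass per color, accumulating the running total and the ' + '-separated value string together and concatenating blocks with an explicit first-flag, finishing with lstrip (the text always ends in 'mm').
import Mathlib
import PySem

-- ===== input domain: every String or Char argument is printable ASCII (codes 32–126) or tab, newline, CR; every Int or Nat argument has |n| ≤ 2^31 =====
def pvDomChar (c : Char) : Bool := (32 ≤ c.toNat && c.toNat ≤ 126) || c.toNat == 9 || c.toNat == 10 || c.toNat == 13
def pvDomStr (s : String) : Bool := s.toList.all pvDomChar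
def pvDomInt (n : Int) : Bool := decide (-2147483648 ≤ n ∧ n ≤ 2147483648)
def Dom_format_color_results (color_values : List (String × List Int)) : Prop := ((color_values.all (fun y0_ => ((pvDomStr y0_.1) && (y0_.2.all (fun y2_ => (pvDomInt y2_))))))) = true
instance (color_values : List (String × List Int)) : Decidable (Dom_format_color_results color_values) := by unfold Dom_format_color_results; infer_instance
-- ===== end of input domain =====

-- B replaces A's sorted/sum/join/strip pipeline by an insertion sort fused with the
-- filtering pass and a streaming block build (running total, manual separators, lstrip);
-- alternative decomposition, same result; return value only.

-- ===== PORT A =====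
def format_color_results (color_values : List (String × List Int)) : String :=
  let result_lines : List String :=
    (PySem.List.sorted color_values (fun p => p.1)).foldl
      (fun acc p =>
        if p.2 ≠ [] then
          acc ++ [p.1 ++ ":",
                  "  Values: " ++ PySem.Str.join " + " (p.2.map PySem.Int.toStr),
                  "  Total: " ++ PySem.Int.toStr p.2.sum ++ " mm",
                  ""]
        else acc) []
  let result_lines := if result_lines = [] then ["No colored values detected in image"] else result_lines
  PySem.Str.strip (PySem.Str.join "\n" result_lines)

-- ===== PORT B =====
-- the while/insert loop of Source B: walk past smaller names, insert in front of the rest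
def pvInsSorted (name : String) (values : List Int) : List (String × List Int) → List (String × List Int)
  | [] => [(name, values)]
  | q :: rest => if q.1 < name then q :: pvInsSorted name values rest else (name, values) :: q :: rest

-- the inner per-color loop of Source B: block text, separator state and running total together
def pvBlockB (name : String) (values : List Int) : String :=
  let st := values.foldl
    (fun (st : String × String × Int) v => (st.1 ++ st.2.1 ++ PySem.Int.toStr v, " + ", st.2.2 + v))
    (name ++ ":\n  Values: ", "", 0)
  st.1 ++ "\n  Total: " ++ PySem.Int.toStr st.2.2 ++ " mm"

def format_color_results_alt (color_values : List (String × List Int)) : String :=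
  let ordered := color_values.foldl
    (fun acc p => if p.2 ≠ [] then pvInsSorted p.1 p.2 acc else acc) []
  if ordered = [] then "No colored values detected in image"
  else
    let st := ordered.foldl
      (fun (st : String × Bool) p =>
        (if st.2 then pvBlockB p.1 p.2 else st.1 ++ "\n\n" ++ pvBlockB p.1 p.2, false))
      ("", true)
    PySem.Str.lstrip st.1

-- ===== PRECONDITION & SPEC =====
-- Pre_ excludes association lists with duplicate color names: a Python dict cannot hold
-- duplicate keys, so such lists represent no dict input of A (Python's tuple sort would
-- compare the value lists on a tie, which the key-only sort of the ports does not model).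
def Pre_format_color_results (color_values : List (String × List Int)) : Prop :=
  (color_values.map Prod.fst).Nodup
instance (color_values : List (String × List Int)) : Decidable (Pre_format_color_results color_values) := by unfold Pre_format_color_results; infer_instance
def pvWitness_format_color_results : (List (String × List Int)) := [("red", [3, 4]), ("blue", [])]

def Spec_format_color_results (color_values : List (String × List Int)) (out : String) : Prop := out = format_color_results_alt color_values
instance (color_values : List (String × List Int)) (out : String) : Decidable (Spec_format_color_results color_values out) := by unfold Spec_format_color_results; infer_instance

-- ===== CLAIM (what is proved, stated in full; the proofs are below) =====
def Claim_equal_format_color_results : Prop := ∀ (color_values : List (String × List Int)), Dom_format_color_results color_values → Pre_format_color_results color_values → Spec_format_color_results color_values (format_color_results color_values)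

-- ===== LEMMAS AND PROOFS =====

-- A's per-color block, as one string (proof-side normal form shared by both reductions)
def pvBlock (name : String) (values : List Int) : String :=
  name ++ ":\n" ++ "  Values: " ++ PySem.Str.join " + " (values.map PySem.Int.toStr)
    ++ "\n" ++ "  Total: " ++ PySem.Int.toStr values.sum ++ " mm"

theorem rstrip_newline (s : List Char) :
    PySem.Chars.rstrip (s ++ ['\n']) = PySem.Chars.rstrip s := by
  have h : PySem.Chars.isspace '\n' = true := by decide
  simp [PySem.Chars.rstrip, h]

theorem lstrip_append (s t : List Char) :
    PySem.Chars.lstrip (s ++ t) =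
      if PySem.Chars.lstrip s = [] then PySem.Chars.lstrip t
      else PySem.Chars.lstrip s ++ t := by
  simp [PySem.Chars.lstrip, List.dropWhile_append, List.isEmpty_iff]

theorem strip_newline (s : List Char) :
    PySem.Chars.strip (s ++ ['\n']) = PySem.Chars.strip s := by
  simp only [PySem.Chars.strip, lstrip_append]
  split_ifs with h2
  · rw [h2, show PySem.Chars.lstrip ['\n'] = [] from by decide]
  · exact rstrip_newline _

theorem interc_cons (s a x : List Char) (l : List (List Char)) :
    s.intercalate (a :: x :: l) = a ++ s ++ s.intercalate (x :: l) := by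
  simp [List.intercalate, List.intersperse]

theorem intercal4 (s a b c d : List Char) (r : List (List Char)) (h : r ≠ []) :
    s.intercalate (a :: b :: c :: d :: r) =
      a ++ s ++ b ++ s ++ c ++ s ++ d ++ s ++ s.intercalate r := by
  cases r with
  | nil => simp at h
  | cons y ys => simp [interc_cons, List.append_assoc]

-- the flat line list of A, joined with "\n", is the block list joined with "\n\n", plus a trailing "\n"
theorem join_flat (q : List (String × List Int)) (h : q ≠ []) :
    PySem.Chars.join ['\n']
        (List.map String.toList
          (List.flatMap (fun p =>
            [p.1 ++ ":",
             "  Values: " ++ PySem.Str.join " + " (p.2.map PySem.Int.toStr),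
             "  Total: " ++ PySem.Int.toStr p.2.sum ++ " mm",
             ""]) q))
      = PySem.Chars.join ['\n', '\n']
          (List.map String.toList (q.map (fun p => pvBlock p.1 p.2))) ++ ['\n'] := by
  induction q with
  | nil => simp at h
  | cons p q ih =>
    cases q with
    | nil =>
      simp [PySem.Chars.join, List.intercalate, List.intersperse, pvBlock,
        String.toList_append]
    | cons p2 q2 =>
      have ih' := ih (by simp)
      have hne : (List.map String.toList
          (List.flatMap (fun p =>
            [p.1 ++ ":",
             "  Values: " ++ PySem.Str.join " + " (p.2.map PySem.Int.toStr),
             "  Total: " ++ PySem.Int.toStr p.2.sum ++ " mm",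
             ""]) (p2 :: q2))) ≠ [] := by simp
      rw [PySem.Chars.join] at ih' ⊢
      rw [List.flatMap_cons, List.map_append]
      generalize hR : (List.map String.toList
          (List.flatMap (fun p =>
            [p.1 ++ ":",
             "  Values: " ++ PySem.Str.join " + " (p.2.map PySem.Int.toStr),
             "  Total: " ++ PySem.Int.toStr p.2.sum ++ " mm",
             ""]) (p2 :: q2))) = R at ih' hne ⊢
      simp only [List.map_cons, List.map_nil, List.cons_append, List.nil_append]
      rw [intercal4 _ _ _ _ _ R hne, ih']
      simp only [PySem.Chars.join, List.map_cons]
      rw [interc_cons]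
      simp [pvBlock, String.toList_append, List.append_assoc]

theorem flatMap_ite_eq_filter {α β : Type} (c : α → Prop) [DecidablePred c]
    (f : α → List β) (l : List α) :
    List.flatMap (fun x => if c x then f x else []) l =
      List.flatMap f (l.filter (fun x => decide (c x))) := by
  induction l with
  | nil => rfl
  | cons x l ih =>
    by_cases h : c x <;> simp [List.flatMap_cons, h, ih]

-- ---- chunk 1: the insertion-sort fold equals filter-of-sorted on nodup keys ----

theorem pvIns_perm (n : String) (v : List Int) (ys : List (String × List Int)) :
    (pvInsSorted n v ys).Perm ((n, v) :: ys) := by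
  induction ys with
  | nil => simp [pvInsSorted]
  | cons y ys ih =>
    simp only [pvInsSorted]
    split
    · exact (ih.cons y).trans (List.Perm.swap _ _ _)
    · exact List.Perm.refl _

theorem pvIns_pairwise (n : String) (v : List Int) (ys : List (String × List Int))
    (h : ys.Pairwise (fun a b => a.1 < b.1)) (hne : ∀ y ∈ ys, n ≠ y.1) :
    (pvInsSorted n v ys).Pairwise (fun a b => a.1 < b.1) := by
  induction ys with
  | nil => simp [pvInsSorted]
  | cons y ys ih =>
    simp only [pvInsSorted]
    rcases h with _ | ⟨hy, hys⟩
    split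
    · rename_i hlt
      refine List.Pairwise.cons ?_ (ih hys (fun z hz => hne z (by simp [hz])))
      intro z hz
      rcases List.mem_cons.mp (((pvIns_perm n v ys).mem_iff).mp hz) with hz0 | hz'
      · rw [hz0]; exact hlt
      · exact hy z hz'
    · rename_i hnlt
      have hlt : n < y.1 := lt_of_le_of_ne (not_lt.mp hnlt) (hne y (by simp))
      refine List.Pairwise.cons ?_ (List.Pairwise.cons hy hys)
      intro z hz
      rcases List.mem_cons.mp hz with hz0 | hz'
      · rw [hz0]; exact hlt
      · exact lt_trans hlt (hy z hz')

theorem foldIns_spec (cv : List (String × List Int)) :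
    ∀ (acc : List (String × List Int)),
    ((acc.map Prod.fst) ++ (cv.map Prod.fst)).Nodup →
    acc.Pairwise (fun a b => a.1 < b.1) →
    (cv.foldl (fun acc p => if p.2 ≠ [] then pvInsSorted p.1 p.2 acc else acc) acc).Perm
        (acc ++ cv.filter (fun p => decide (p.2 ≠ []))) ∧
    (cv.foldl (fun acc p => if p.2 ≠ [] then pvInsSorted p.1 p.2 acc else acc) acc).Pairwise
        (fun a b => a.1 < b.1) := by
  induction cv with
  | nil => intro acc _ hpw; exact ⟨by simp, hpw⟩
  | cons p cv ih =>
    intro acc hnd hpw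
    by_cases hp : p.2 ≠ []
    · have hnd1 : ((acc.map Prod.fst) ++ p.1 :: (cv.map Prod.fst)).Nodup := by
        have h := hnd; simp only [List.map_cons] at h; exact h
      have hne : ∀ y ∈ acc, p.1 ≠ y.1 := by
        intro y hy hEq
        rcases (List.nodup_append.mp hnd1) with ⟨_, _, hdisj⟩
        exact hdisj y.1 (List.mem_map_of_mem hy) y.1
          (show y.1 ∈ p.1 :: List.map Prod.fst cv by rw [← hEq]; simp) rfl
      have hpermIns : ((pvInsSorted p.1 p.2 acc).map Prod.fst).Perm
          (p.1 :: acc.map Prod.fst) := by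
        simpa using (pvIns_perm p.1 p.2 acc).map Prod.fst
      have hnd' : (((pvInsSorted p.1 p.2 acc).map Prod.fst) ++ (cv.map Prod.fst)).Nodup := by
        have hmid : (p.1 :: (acc.map Prod.fst ++ cv.map Prod.fst)).Nodup :=
          List.perm_middle.nodup hnd1
        have hb : (((pvInsSorted p.1 p.2 acc).map Prod.fst) ++ (cv.map Prod.fst)).Perm
            (p.1 :: (acc.map Prod.fst ++ cv.map Prod.fst)) := by
          refine (hpermIns.append_right _).trans ?_
          simp
        exact hb.symm.nodup hmid
      have hpw' := pvIns_pairwise p.1 p.2 acc hpw hne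
      obtain ⟨hperm2, hpw2⟩ := ih (pvInsSorted p.1 p.2 acc) hnd' hpw'
      constructor
      · simp only [List.foldl_cons, if_pos hp, List.filter_cons,
          decide_eq_true_eq]
        refine hperm2.trans ?_
        refine (((pvIns_perm p.1 p.2 acc).append_right _).trans ?_)
        have : ((p.1, p.2) :: acc) ++ cv.filter (fun p => decide (p.2 ≠ []))
            = (p.1, p.2) :: (acc ++ cv.filter (fun p => decide (p.2 ≠ []))) := by simp
        rw [this]
        simpa using List.perm_middle.symm
      · simpa only [List.foldl_cons, if_pos hp] using hpw2
    · have hnd' : ((acc.map Prod.fst) ++ (cv.map Prod.fst)).Nodup := by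
        have hsub : ((acc.map Prod.fst) ++ (cv.map Prod.fst)).Sublist
            ((acc.map Prod.fst) ++ ((p :: cv).map Prod.fst)) := by
          simp only [List.map_cons]
          exact List.Sublist.append_left (List.sublist_cons_self _ _) _
        exact hsub.nodup hnd
      obtain ⟨hperm2, hpw2⟩ := ih acc hnd' hpw
      refine ⟨?_, by simpa only [List.foldl_cons, if_neg hp] using hpw2⟩
      simp only [List.foldl_cons, if_neg hp, List.filter_cons]
      simpa [hp] using hperm2

theorem ordered_eq (cv : List (String × List Int)) (hpre : (cv.map Prod.fst).Nodup) :
    cv.foldl (fun acc p => if p.2 ≠ [] then pvInsSorted p.1 p.2 acc else acc) []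
      = (PySem.List.sorted cv (fun p => p.1)).filter (fun p => decide (p.2 ≠ [])) := by
  obtain ⟨hperm, hpw⟩ := foldIns_spec cv [] (by simpa using hpre) List.Pairwise.nil
  have hS : (PySem.List.sorted cv (fun p => p.1)).Perm cv := PySem.List.sorted_perm cv _ _
  have hfp : ((PySem.List.sorted cv (fun p => p.1)).filter
      (fun p => decide (p.2 ≠ []))).Perm (cv.filter (fun p => decide (p.2 ≠ []))) :=
    hS.filter _
  have hpwS : (PySem.List.sorted cv (fun p => p.1)).Pairwise (fun a b => a.1 ≤ b.1) :=
    PySem.List.sorted_pairwise cv _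
  have hndS : ((PySem.List.sorted cv (fun p => p.1)).map Prod.fst).Nodup :=
    ((hS.map Prod.fst).nodup_iff).mpr hpre
  have hpwF : ((PySem.List.sorted cv (fun p => p.1)).filter
      (fun p => decide (p.2 ≠ []))).Pairwise (fun a b => a.1 ≤ b.1) :=
    hpwS.filter _
  have hndF : (((PySem.List.sorted cv (fun p => p.1)).filter
      (fun p => decide (p.2 ≠ []))).map Prod.fst).Nodup :=
    (List.filter_sublist.map Prod.fst).nodup hndS
  have hneF : ((PySem.List.sorted cv (fun p => p.1)).filter
      (fun p => decide (p.2 ≠ []))).Pairwise (fun a b => a.1 ≠ b.1) := by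
    rw [List.Nodup, List.pairwise_map] at hndF
    exact hndF
  have hpwFlt : ((PySem.List.sorted cv (fun p => p.1)).filter
      (fun p => decide (p.2 ≠ []))).Pairwise (fun a b => a.1 < b.1) :=
    (hpwF.and hneF).imp (fun h => lt_of_le_of_ne h.1 h.2)
  have hpermBoth := hperm.trans (hfp.symm.trans (List.Perm.refl _))
  exact List.eq_of_perm_of_sorted
    (fun a b _ _ h1 h2 => absurd h2 (not_lt.mpr (le_of_lt h1)))
    hpw hpwFlt (by simpa using hpermBoth)

-- ---- chunk 2: the streamed block equals A's block ----

theorem fold_vals (vs : List Int) :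
    ∀ (s : String) (t : Int),
    vs.foldl (fun (st : String × String × Int) v =>
        (st.1 ++ st.2.1 ++ PySem.Int.toStr v, " + ", st.2.2 + v)) (s, " + ", t)
      = (vs.foldl (fun acc v => acc ++ " + " ++ PySem.Int.toStr v) s, " + ", t + vs.sum) := by
  induction vs with
  | nil => intro s t; simp
  | cons v vs ih =>
    intro s t
    simp only [List.foldl_cons, ih, List.sum_cons]
    refine congrArg _ (congrArg _ ?_)
    omega

theorem fold_str (vs : List Int) :
    ∀ (s : String),
    (vs.foldl (fun acc v => acc ++ " + " ++ PySem.Int.toStr v) s).toList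
      = s.toList ++ (vs.map (fun v =>
          (" + " : String).toList ++ (PySem.Int.toStr v).toList)).flatten := by
  induction vs with
  | nil => intro s; simp
  | cons v vs ih =>
    intro s
    simp [List.foldl_cons, ih, String.toList_append]

theorem join_head (sep : List Char) (x : List Char) (xs : List (List Char)) :
    PySem.Chars.join sep (x :: xs) = x ++ (xs.map (fun y => sep ++ y)).flatten := by
  induction xs generalizing x with
  | nil => simp [PySem.Chars.join_singleton]
  | cons y ys ih =>
    rw [PySem.Chars.join_cons_cons, ih y]
    simp [List.append_assoc]

theorem blockB_eq (n : String) (vs : List Int) : pvBlockB n vs = pvBlock n vs := by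
  apply String.toList_inj.mp
  cases vs with
  | nil =>
    simp [pvBlockB, pvBlock, String.toList_append, PySem.Str.toList_join,
      PySem.Chars.join_nil]
  | cons v vs =>
    have h0 : (0 : Int) + v + vs.sum = (v :: vs).sum := by simp
    simp only [pvBlockB, List.foldl_cons, fold_vals, h0]
    simp only [pvBlock, String.toList_append, fold_str, PySem.Str.toList_join,
      List.map_cons, join_head, List.map_map]
    simp [Function.comp_def]

-- ---- chunk 3: the first-flag concatenation fold is join "\n\n" ----

theorem fold_out (F : List (String × List Int)) :
    ∀ (s : String),
    ((F.foldl (fun (st : String × Bool) p =>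
        (if st.2 then pvBlockB p.1 p.2 else st.1 ++ "\n\n" ++ pvBlockB p.1 p.2, false))
        (s, false)).1).toList
      = s.toList ++ (F.map (fun q =>
          ('\n' :: '\n' :: []) ++ (pvBlockB q.1 q.2).toList)).flatten := by
  induction F with
  | nil => intro s; simp
  | cons q F ih =>
    intro s
    simp [List.foldl_cons, ih, String.toList_append]

theorem out_eq (p : String × List Int) (F : List (String × List Int)) :
    (((p :: F).foldl (fun (st : String × Bool) q =>
        (if st.2 then pvBlockB q.1 q.2 else st.1 ++ "\n\n" ++ pvBlockB q.1 q.2, false))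
        ("", true)).1).toList
      = PySem.Chars.join ['\n', '\n']
          (List.map String.toList ((p :: F).map (fun q => pvBlock q.1 q.2))) := by
  simp only [List.foldl_cons, if_true]
  rw [fold_out F (pvBlockB p.1 p.2)]
  simp only [List.map_cons, List.map_map, join_head]
  simp [blockB_eq, Function.comp_def]

-- ---- chunk 4: on text ending in 'm', strip is lstrip ----

theorem rstrip_last (s : List Char) (c : Char) (hc : PySem.Chars.isspace c = false) :
    PySem.Chars.rstrip (s ++ [c]) = s ++ [c] := by
  simp [PySem.Chars.rstrip, hc]

theorem strip_eq_lstrip_last (s : List Char) (c : Char) (hc : PySem.Chars.isspace c = false) :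
    PySem.Chars.strip (s ++ [c]) = PySem.Chars.lstrip (s ++ [c]) := by
  simp only [PySem.Chars.strip, PySem.Chars.lstrip, List.dropWhile_append]
  split_ifs with h
  · simp [List.dropWhile, hc, PySem.Chars.rstrip]
  · exact rstrip_last _ _ hc

theorem block_last (n : String) (vs : List Int) :
    ∃ u, (pvBlock n vs).toList = u ++ ['m'] := by
  refine ⟨(n ++ ":\n" ++ "  Values: " ++ PySem.Str.join " + " (vs.map PySem.Int.toStr)
    ++ "\n" ++ "  Total: " ++ PySem.Int.toStr vs.sum).toList ++ [' ', 'm'], ?_⟩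
  simp [pvBlock, String.toList_append]

theorem join_last (sep : List Char) :
    ∀ (l : List (List Char)), l ≠ [] → (∀ x ∈ l, ∃ u, x = u ++ ['m']) →
    ∃ u, PySem.Chars.join sep l = u ++ ['m'] := by
  intro l
  induction l with
  | nil => intro h _; simp at h
  | cons x xs ih =>
    intro _ hall
    cases xs with
    | nil =>
      obtain ⟨u, hu⟩ := hall x (by simp)
      exact ⟨u, by simpa [PySem.Chars.join, List.intercalate, List.intersperse] using hu⟩
    | cons y ys =>
      obtain ⟨w, hw⟩ := ih (by simp) (fun z hz => hall z (by simp [hz]))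
      refine ⟨x ++ sep ++ w, ?_⟩
      rw [PySem.Chars.join_cons_cons, hw]
      simp [List.append_assoc]

-- ===== VERDICT (by name: the statement is the Claim_ definition above) =====
theorem format_color_results_spec : Claim_equal_format_color_results := by
  intro cv _ hpre
  unfold Spec_format_color_results format_color_results format_color_results_alt
  rw [ordered_eq cv hpre]
  have hf : (fun (acc : List String) (p : String × List Int) =>
      if p.2 ≠ [] then
        acc ++ [p.1 ++ ":",
                "  Values: " ++ PySem.Str.join " + " (p.2.map PySem.Int.toStr),
                "  Total: " ++ PySem.Int.toStr p.2.sum ++ " mm",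
                ""]
      else acc) =
    (fun acc p => acc ++
      (if p.2 ≠ [] then
        [p.1 ++ ":",
         "  Values: " ++ PySem.Str.join " + " (p.2.map PySem.Int.toStr),
         "  Total: " ++ PySem.Int.toStr p.2.sum ++ " mm",
         ""]
      else [])) := by
    funext acc p; split <;> simp
  rw [hf, PySem.List.foldl_append_eq_flatMap, List.nil_append,
    flatMap_ite_eq_filter (fun p : String × List Int => p.2 ≠ [])]
  generalize (PySem.List.sorted cv (fun p => p.1)).filter
      (fun p : String × List Int => decide (p.2 ≠ [])) = F
  cases F with
  | nil => simp; decide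
  | cons p F' =>
    dsimp only
    have h1 : (List.flatMap (fun p : String × List Int =>
        [p.1 ++ ":",
         "  Values: " ++ PySem.Str.join " + " (p.2.map PySem.Int.toStr),
         "  Total: " ++ PySem.Int.toStr p.2.sum ++ " mm",
         ""]) (p :: F')) ≠ [] := by simp
    rw [if_neg h1, if_neg (by simp)]
    apply String.toList_inj.mp
    rw [PySem.Str.toList_strip, PySem.Str.toList_lstrip, PySem.Str.toList_join]
    have hjf := join_flat (p :: F') (by simp)
    rw [show ("\n" : String).toList = ['\n'] from rfl, hjf, strip_newline, out_eq]
    obtain ⟨u, hu⟩ := join_last ['\n', '\n']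
      (List.map String.toList ((p :: F').map (fun q => pvBlock q.1 q.2)))
      (by simp)
      (by
        intro x hx
        simp only [List.map_map, List.mem_map] at hx
        obtain ⟨q, _, rfl⟩ := hx
        exact block_last q.1 q.2)
    rw [hu]
    exact strip_eq_lstrip_last u 'm' (by decide)
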